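-- pv_equiv track=rewrite | github.com/Syogo-Suganoya/AlgoArena | atcoder/typical90/084/main.py | count_intervals
-- ===== SOURCE A (Python) =====
-- from itertools import groupby
--
-- def arithmetic_sum(a, d, n):
--     return n * (2 * a + (n - 1) * d) // 2
--
-- def count_intervals(N, S):
--     total_intervals = arithmetic_sum(1, 1, N)  # 1からNまでの等差数列の合計
--
--     # ランレングス圧縮で同じ文字の連続区間の長さを取得
--     rle = [(k, len(list(g))) for k, g in groupby(S)]
--
--     # 同じ文字の区間の合計を計算
--     same_char_intervals = 0
--     for _, length in rle:
--         same_char_intervals += arithmetic_sum(1, 1, length)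
--
--     result = total_intervals - same_char_intervals
--     return result
-- ===== SOURCE B (Python) =====
-- def count_intervals(N, S):
--     # one pass: start from all N*(N+1)//2 intervals and subtract, for each
--     # position, the length of the run of equal characters ending there
--     acc = N * (N + 1) // 2
--     run = 0
--     prev = None
--     for ch in S:
--         run = run + 1 if ch == prev else 1
--         prev = ch
--         acc -= run
--     return acc
-- ===== Notes on version B (the rewrite author's own statement) =====
-- stated objective: simpler
-- what changed: replaces groupby run-length compression plus per-run arithmetic-series closed forms with a single character scan that maintains the current run length and subtracts it at every position
import Mathlib
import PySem

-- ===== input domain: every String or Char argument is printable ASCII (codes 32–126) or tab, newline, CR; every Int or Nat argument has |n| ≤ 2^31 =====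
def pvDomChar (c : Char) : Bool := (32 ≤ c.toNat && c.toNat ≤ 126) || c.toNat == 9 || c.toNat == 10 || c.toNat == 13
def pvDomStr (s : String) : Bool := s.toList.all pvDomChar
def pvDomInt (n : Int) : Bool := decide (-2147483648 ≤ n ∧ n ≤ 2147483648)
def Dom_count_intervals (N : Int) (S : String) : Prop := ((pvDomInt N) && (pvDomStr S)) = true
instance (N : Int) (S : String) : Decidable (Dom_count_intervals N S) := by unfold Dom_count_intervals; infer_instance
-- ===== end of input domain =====

-- B replaces A's groupby run-length compression + per-run arithmetic-series
-- closed forms by a single scan subtracting the current run length per position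
-- (objective: simpler); equal on all inputs.

-- ===== PORT A =====
def arithmetic_sum (a d n : Int) : Int :=
  PySem.Int.floordiv (n * (2 * a + (n - 1) * d)) 2

-- itertools.groupby over a string, already paired with group lengths
-- (rle = [(k, len(list(g))) for k, g in groupby(S)]); exact for lists of chars
def pvGroupby : List Char → List (Char × Int)
  | [] => []
  | c :: rest =>
      (c, ((rest.takeWhile (fun x => x = c)).length : Int) + 1) ::
        pvGroupby (rest.dropWhile (fun x => x = c))
termination_by l => l.length
decreasing_by
  simpa using Nat.lt_succ_of_le (List.length_dropWhile_le _ _)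

def count_intervals (N : Int) (S : String) : Int :=
  let total_intervals := arithmetic_sum 1 1 N
  let rle := pvGroupby S.toList
  let same_char_intervals := rle.foldl (fun acc p => acc + arithmetic_sum 1 1 p.2) 0
  total_intervals - same_char_intervals

-- ===== PORT B =====
def altStep (st : Int × Int × Option Char) (ch : Char) : Int × Int × Option Char :=
  let run := if (some ch : Option Char) = st.2.2 then st.2.1 + 1 else 1
  (st.1 - run, run, some ch)

def count_intervals_alt (N : Int) (S : String) : Int :=
  (S.toList.foldl altStep (PySem.Int.floordiv (N * (N + 1)) 2, 0, none)).1

-- ===== PRECONDITION & SPEC =====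
def Spec_count_intervals (N : Int) (S : String) (out : Int) : Prop := out = count_intervals_alt N S
instance (N : Int) (S : String) (out : Int) : Decidable (Spec_count_intervals N S out) := by unfold Spec_count_intervals; infer_instance

-- ===== CLAIM (what is proved, stated in full; the proofs are below) =====
def Claim_equal_count_intervals : Prop := ∀ (N : Int) (S : String), Dom_count_intervals N S → Spec_count_intervals N S (count_intervals N S)

-- ===== LEMMAS AND PROOFS =====

-- mirror of B's loop that computes only the total subtracted amount
def G (c : Char) (run : Int) : List Char → Int
  | [] => 0
  | x :: xs =>
      let r := if (some x : Option Char) = some c then run + 1 else 1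
      r + G x r xs

theorem foldl_altStep_fst (l : List Char) (acc run : Int) (c : Char) :
    (l.foldl altStep (acc, run, some c)).1 = acc - G c run l := by
  induction l generalizing acc run c with
  | nil => simp [G]
  | cons x xs ih =>
      simp only [List.foldl, altStep, G]
      rw [ih]
      by_cases h : (some x : Option Char) = some c <;> simp [h] <;> ring

theorem G_shift (l : List Char) (c : Char) (r s : Int) :
    G c r l - G c s l = (r - s) * ((l.takeWhile (fun x => x = c)).length : Int) := by
  induction l generalizing c r s with
  | nil => simp [G]
  | cons x xs ih =>
      by_cases hx : x = c
      · subst hx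
        simp only [G, List.takeWhile_cons, decide_true]
        have := ih x (r + 1) (s + 1)
        push_cast [List.length_cons] at this ⊢
        linarith
      · simp [G, hx]

-- triangular-number step used to peel one character off the leading run
theorem arith_succ (m : Nat) :
    arithmetic_sum 1 1 ((m : Int) + 1) = arithmetic_sum 1 1 (m : Int) + (m : Int) + 1 := by
  unfold arithmetic_sum
  rw [PySem.Int.floordiv_eq_ediv_of_pos (by norm_num),
      PySem.Int.floordiv_eq_ediv_of_pos (by norm_num)]
  have h2 : ((m : Int) + 1) * (2 * 1 + ((m : Int) + 1 - 1) * 1) = (m : Int) * (2 * 1 + ((m : Int) - 1) * 1) + 2 * ((m : Int) + 1) := by ring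
  rw [h2]
  omega

def sumT (l : List (Char × Int)) : Int := (l.map (fun p => arithmetic_sum 1 1 p.2)).sum

theorem foldl_sumT (l : List (Char × Int)) (a : Int) :
    l.foldl (fun acc p => acc + arithmetic_sum 1 1 p.2) a = a + sumT l := by
  induction l generalizing a with
  | nil => simp [sumT]
  | cons x xs ih => simp [List.foldl, sumT, ih]; ring

-- peel the head character off the groupby decomposition
theorem sumT_groupby_cons (x : Char) (xs : List Char) :
    sumT (pvGroupby (x :: xs)) =
      1 + ((xs.takeWhile (fun c => c = x)).length : Int) + sumT (pvGroupby xs) := by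
  cases xs with
  | nil => simp [pvGroupby, sumT, arithmetic_sum, PySem.Int.floordiv]
  | cons y ys =>
      by_cases hy : y = x
      · subst hy
        rw [pvGroupby, pvGroupby]
        simp only [List.takeWhile_cons, List.dropWhile_cons, decide_true]
        simp only [sumT, List.map_cons, List.sum_cons]
        have := arith_succ ((ys.takeWhile (fun c => c = y)).length + 1)
        push_cast [List.length_cons] at this ⊢
        linarith
      · rw [pvGroupby]
        simp only [List.takeWhile_cons, List.dropWhile_cons, hy, decide_eq_true_eq]
        simp [sumT, arithmetic_sum, PySem.Int.floordiv]

theorem G_fresh (l : List Char) : ∀ (c : Char), G c 0 l = sumT (pvGroupby l) := by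
  induction l with
  | nil => intro c; simp [G, pvGroupby, sumT]
  | cons x xs ih =>
      intro c
      have h1 : G x 1 xs = G x 0 xs + ((xs.takeWhile (fun a => a = x)).length : Int) := by
        have := G_shift xs x 1 0
        linarith
      rw [sumT_groupby_cons]
      simp only [G]
      split
      · rw [show (0:Int) + 1 = 1 by ring, h1, ih x]; ring
      · rw [h1, ih x]; ring

-- ===== VERDICT (by name: the statement is the Claim_ definition above) =====
theorem count_intervals_spec : Claim_equal_count_intervals := by
  intro N S _
  have htot : arithmetic_sum 1 1 N = PySem.Int.floordiv (N * (N + 1)) 2 := by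
    unfold arithmetic_sum; ring_nf
  show count_intervals N S = count_intervals_alt N S
  have hA : count_intervals N S
      = arithmetic_sum 1 1 N
        - List.foldl (fun acc p => acc + arithmetic_sum 1 1 p.2) 0 (pvGroupby S.toList) := rfl
  have hB : count_intervals_alt N S
      = (S.toList.foldl altStep (PySem.Int.floordiv (N * (N + 1)) 2, 0, none)).1 := rfl
  rw [hA, hB, foldl_sumT, htot]
  cases hL : S.toList with
  | nil => simp [pvGroupby, sumT]
  | cons x xs =>
      have hstep : altStep (PySem.Int.floordiv (N * (N + 1)) 2, 0, none) x
          = (PySem.Int.floordiv (N * (N + 1)) 2 - 1, 1, some x) := by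
        simp [altStep]
      have hfresh : sumT (pvGroupby (x :: xs)) = 1 + G x 1 xs := by
        rw [← G_fresh (x :: xs) x]
        simp [G]
      rw [List.foldl_cons, hstep, foldl_altStep_fst, hfresh]
      ring
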